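-- pv_equiv track=rewrite | github.com/Ninni51/its-esercizi | Lezione_01/waaa.py | seconds_since_noon
-- ===== SOURCE A (Python) =====
-- def seconds_since_noon(hours:int, minutes:int, seconds:int) -> int:
--     hours = hours%12
--     minutes = minutes % 60
--     seconds = seconds % 60
--     while hours>0:
--         seconds = seconds+3600
--         hours-=1
--
--     while minutes>0:
--         seconds = seconds+60
--         minutes-=1
--
--     return seconds
-- ===== SOURCE B (Python) =====
-- def seconds_since_noon(hours: int, minutes: int, seconds: int) -> int:
--     # closed-form: no loops, direct arithmetic after the modulo reductions
--     return seconds % 60 + (hours % 12) * 3600 + (minutes % 60) * 60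
-- ===== Notes on version B (the rewrite author's own statement) =====
-- stated objective: simpler
-- what changed: Replaces the two counting-down accumulation loops with one closed-form arithmetic expression after the modulo reductions.
import Mathlib
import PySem

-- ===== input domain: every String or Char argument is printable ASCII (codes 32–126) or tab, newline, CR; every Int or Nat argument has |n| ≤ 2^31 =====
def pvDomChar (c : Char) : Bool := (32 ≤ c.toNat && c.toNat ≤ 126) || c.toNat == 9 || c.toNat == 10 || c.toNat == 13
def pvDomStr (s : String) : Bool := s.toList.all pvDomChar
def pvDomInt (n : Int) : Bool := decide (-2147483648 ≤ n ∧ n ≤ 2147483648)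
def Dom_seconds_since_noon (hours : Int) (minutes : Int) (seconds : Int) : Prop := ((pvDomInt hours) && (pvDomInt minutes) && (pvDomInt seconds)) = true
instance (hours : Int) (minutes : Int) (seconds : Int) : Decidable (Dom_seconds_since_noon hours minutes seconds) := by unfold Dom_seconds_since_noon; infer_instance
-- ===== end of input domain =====

-- B replaces A's two accumulation loops with one closed-form arithmetic expression (objective: simpler).

-- ===== PORT A =====
-- 'while c > 0: acc += step; c -= 1' as structural recursion on c
def pvWhileAdd (c : Int) (step : Int) (acc : Int) : Int :=
  if h : c > 0 then pvWhileAdd (c - 1) step (acc + step) else acc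
termination_by c.toNat
decreasing_by omega

def seconds_since_noon (hours : Int) (minutes : Int) (seconds : Int) : Int :=
  let hours := PySem.Int.mod hours 12
  let minutes := PySem.Int.mod minutes 60
  let seconds := PySem.Int.mod seconds 60
  let seconds := pvWhileAdd hours 3600 seconds
  let seconds := pvWhileAdd minutes 60 seconds
  seconds

-- ===== PORT B =====
def seconds_since_noon_alt (hours : Int) (minutes : Int) (seconds : Int) : Int :=
  PySem.Int.mod seconds 60 + (PySem.Int.mod hours 12) * 3600 + (PySem.Int.mod minutes 60) * 60

-- ===== PRECONDITION & SPEC =====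
def Spec_seconds_since_noon (hours : Int) (minutes : Int) (seconds : Int) (out : Int) : Prop := out = seconds_since_noon_alt hours minutes seconds
instance (hours : Int) (minutes : Int) (seconds : Int) (out : Int) : Decidable (Spec_seconds_since_noon hours minutes seconds out) := by unfold Spec_seconds_since_noon; infer_instance

-- ===== CLAIM (what is proved, stated in full; the proofs are below) =====
def Claim_equal_seconds_since_noon : Prop := ∀ (hours : Int) (minutes : Int) (seconds : Int), Dom_seconds_since_noon hours minutes seconds → Spec_seconds_since_noon hours minutes seconds (seconds_since_noon hours minutes seconds)

-- ===== LEMMAS AND PROOFS =====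
theorem pvWhileAdd_eq (c : Int) (hc : 0 ≤ c) (step acc : Int) :
    pvWhileAdd c step acc = acc + c * step := by
  obtain ⟨n, rfl⟩ := Int.eq_ofNat_of_zero_le hc
  induction n generalizing acc with
  | zero => rw [pvWhileAdd]; simp
  | succ k ih =>
    rw [pvWhileAdd]
    rw [dif_pos (show ((k + 1 : ℕ) : Int) > 0 by exact_mod_cast Nat.succ_pos k)]
    rw [show ((k + 1 : ℕ) : Int) - 1 = (k : Int) by push_cast; ring]
    rw [ih _ (by positivity)]
    push_cast
    ring

-- ===== VERDICT (by name: the statement is the Claim_ definition above) =====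
theorem seconds_since_noon_spec : Claim_equal_seconds_since_noon := by
  intro h m s _
  show seconds_since_noon h m s = seconds_since_noon_alt h m s
  unfold seconds_since_noon seconds_since_noon_alt
  dsimp only
  rw [pvWhileAdd_eq _ (PySem.Int.mod_nonneg h (by norm_num : (0:Int) < 12)),
      pvWhileAdd_eq _ (PySem.Int.mod_nonneg m (by norm_num : (0:Int) < 60))]
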